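-- pv_equiv track=rewrite | github.com/dvdblk/leetcode | problems/1992-find-all-groups-of-farmland/solution.py | findFarmland
-- ===== SOURCE A (Python) =====
-- from typing import List
--
-- def findFarmland(land: List[List[int]]) -> List[List[int]]:
--     group_coordinates = []
--
--     def dfs(i, j):
--         if 0 <= i < len(land) and 0 <= j < len(land[i]) and land[i][j] == 1:
--             land[i][j] = 2
--             # move down and to the right
--             r1, c1 = dfs(i + 1, j)
--             r2, c2 = dfs(i, j + 1)
--             # take the max coords in both directions (and current pos)
--             r = max(i, r1, r2)
--             c = max(j, c1, c2)
--             return (r, c)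
--         else:
--             return (0, 0)
--
--     for i in range(len(land)):
--         for j in range(len(land[i])):
--             if land[i][j] == 1:
--                 r, c = dfs(i, j)
--                 group_coordinates.append((i, j, r, c))
--
--     return group_coordinates
-- ===== SOURCE B (Python) =====
-- def findFarmland(land):
--     group_coordinates = []
--     for i in range(len(land)):
--         for j in range(len(land[i])):
--             if land[i][j] == 1:
--                 r, c = i, j
--                 stack = [(i, j)]
--                 while stack:
--                     y, x = stack.pop()
--                     if 0 <= y < len(land) and 0 <= x < len(land[y]) and land[y][x] == 1:
--                         land[y][x] = 2
--                         if r < y: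
--                             r = y
--                         if c < x:
--                             c = x
--                         stack.append((y, x + 1))
--                         stack.append((y + 1, x))
--                 group_coordinates.append((i, j, r, c))
--     return group_coordinates
-- ===== Notes on version B (the rewrite author's own statement) =====
-- stated objective: alternative
-- what changed: A's recursive dfs over the grid is replaced by an iterative flood walk with an explicit stack that tracks running row/column maxima, removing recursion entirely (so no recursion-depth limit); the grid mutation and output order are identical.
import Mathlib
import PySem

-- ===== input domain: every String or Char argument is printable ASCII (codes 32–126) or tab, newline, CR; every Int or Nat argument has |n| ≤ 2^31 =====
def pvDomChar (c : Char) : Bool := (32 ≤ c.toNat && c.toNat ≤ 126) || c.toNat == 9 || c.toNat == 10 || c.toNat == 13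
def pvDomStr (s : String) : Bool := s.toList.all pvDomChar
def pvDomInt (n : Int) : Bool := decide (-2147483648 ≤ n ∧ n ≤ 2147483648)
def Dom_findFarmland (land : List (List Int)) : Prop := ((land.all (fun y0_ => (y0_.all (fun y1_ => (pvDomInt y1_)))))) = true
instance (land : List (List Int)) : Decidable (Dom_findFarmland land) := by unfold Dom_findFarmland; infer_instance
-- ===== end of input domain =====

-- B replaces A's recursive dfs by an explicit-stack flood walk (iterative, no recursion);
-- both Pythons mutate `land` identically (visited 1-cells set to 2); equivalence proved on return values.

-- ===== PORT A =====

-- shared bounds-and-value test: Python's `0 <= i < len(land) and 0 <= j < len(land[i]) and land[i][j] == 1`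
def pvIsOne (g : List (List Int)) (y x : Int) : Bool :=
  0 ≤ y && y < (g.length : Int) && 0 ≤ x && x < (((g.getD y.toNat []).length : Nat) : Int)
    && ((g.getD y.toNat []).getD x.toNat 0 == 1)

-- Python's `land[i][j] = 2` (in-place write, modelled functionally)
def pvSetCell (g : List (List Int)) (i j : Nat) : List (List Int) :=
  g.set i ((g.getD i []).set j 2)

-- number of 1-cells (termination measure for the B port's stack loop)
def pvOnes (g : List (List Int)) : Nat :=
  (g.map (fun row => row.countP (fun v => v == 1))).sum

-- A's recursive dfs; the fuel argument only makes the (terminating) Python recursion structural,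
-- the outer call passes more fuel than the recursion depth can ever reach.
def dfsA : Nat → List (List Int) → Int → Int → List (List Int) × Int × Int
  | 0, g, _, _ => (g, 0, 0)
  | f + 1, g, i, j =>
    if pvIsOne g i j then
      let g1 := pvSetCell g i.toNat j.toNat
      let p1 := dfsA f g1 (i + 1) j
      let p2 := dfsA f p1.1 i (j + 1)
      (p2.1, max i (max p1.2.1 p2.2.1), max j (max p1.2.2 p2.2.2))
    else (g, 0, 0)

def findFarmland (land : List (List Int)) : List (Int × Int × Int × Int) :=
  let fuel := land.length + (land.map List.length).sum + 2
  ((List.range land.length).foldl (fun (st : List (List Int) × List (Int × Int × Int × Int)) i =>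
    (List.range ((st.1.getD i []).length)).foldl (fun st j =>
      if (st.1.getD i []).getD j 0 == 1 then
        let p := dfsA fuel st.1 (i : Int) (j : Int)
        (p.1, st.2 ++ [((i : Int), (j : Int), p.2.1, p.2.2)])
      else st) st) (land, [])).2

-- ===== PORT B =====

-- countP decreases when a 1-cell is overwritten with 2 (termination helper for the B port)
theorem pvCountP_set_two (row : List Int) : ∀ (m : Nat), m < row.length → row.getD m 0 = 1 →
    (row.set m 2).countP (fun v => v == 1) + 1 = row.countP (fun v => v == 1) := by
  induction row with
  | nil => intro m h; simp at h
  | cons a t ih =>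
    intro m hm hv
    cases m with
    | zero => simp_all
    | succ m =>
      simp only [List.set_cons_succ, List.countP_cons]
      have hv' : t.getD m 0 = 1 := by simpa [List.getD_cons_succ] using hv
      have := ih m (by simpa using hm) hv'
      omega

theorem pvSum_set (l : List Nat) : ∀ (i : Nat) (a : Nat), i < l.length →
    (l.set i a).sum + l.getD i 0 = l.sum + a := by
  induction l with
  | nil => intro i a h; simp at h
  | cons b t ih =>
    intro i a hi
    cases i with
    | zero => simp; omega
    | succ i =>
      simp only [List.set_cons_succ, List.sum_cons, List.getD_cons_succ]
      have := ih i a (by simpa using hi)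
      omega

theorem pvIsOne_spec (g : List (List Int)) (y x : Int) (h : pvIsOne g y x = true) :
    0 ≤ y ∧ 0 ≤ x ∧ y.toNat < g.length ∧ x.toNat < (g.getD y.toNat []).length ∧
      (g.getD y.toNat []).getD x.toNat 0 = 1 := by
  simp only [pvIsOne, Bool.and_eq_true, decide_eq_true_eq, beq_iff_eq] at h
  exact ⟨h.1.1.1.1, h.1.1.2, by omega, by omega, h.2⟩

-- termination helper for the stack walk: marking a 1-cell strictly decreases the 1-count
theorem pvOnes_setCell_lt (g : List (List Int)) (y x : Int) (h : pvIsOne g y x = true) :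
    pvOnes (pvSetCell g y.toNat x.toNat) < pvOnes g := by
  obtain ⟨hy0, hx0, hyl, hxl, hv⟩ := pvIsOne_spec g y x h
  unfold pvOnes pvSetCell
  rw [List.map_set]
  have hgd : (g.map (fun row => row.countP (fun v => v == 1))).getD y.toNat 0
      = (g.getD y.toNat []).countP (fun v => v == 1) := by
    simpa using (List.getD_map (l := g) (d := []) (n := y.toNat)
      (fun row => row.countP (fun v => v == 1)))
  have hc := pvCountP_set_two (g.getD y.toNat []) x.toNat hxl hv
  have hs := pvSum_set (g.map (fun row => row.countP (fun v => v == 1))) y.toNat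
      (((g.getD y.toNat []).set x.toNat 2).countP (fun v => v == 1)) (by simpa using hyl)
  omega

-- B's while-loop over an explicit stack (pop; if land cell, mark, update maxes, push right then down)
def floodB (g : List (List Int)) (stack : List (Int × Int)) (r c : Int) :
    List (List Int) × Int × Int :=
  match stack with
  | [] => (g, r, c)
  | (y, x) :: rest =>
    if h : pvIsOne g y x = true then
      floodB (pvSetCell g y.toNat x.toNat) ((y + 1, x) :: (y, x + 1) :: rest)
        (if r < y then y else r) (if c < x then x else c)
    else floodB g rest r c
termination_by 3 * pvOnes g + stack.length
decreasing_by
  · have := pvOnes_setCell_lt g y x h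
    simp only [List.length_cons]; omega
  · simp only [List.length_cons]; omega

def findFarmland_alt (land : List (List Int)) : List (Int × Int × Int × Int) :=
  ((List.range land.length).foldl (fun (st : List (List Int) × List (Int × Int × Int × Int)) i =>
    (List.range ((st.1.getD i []).length)).foldl (fun st j =>
      if (st.1.getD i []).getD j 0 == 1 then
        let p := floodB st.1 [((i : Int), (j : Int))] (i : Int) (j : Int)
        (p.1, st.2 ++ [((i : Int), (j : Int), p.2.1, p.2.2)])
      else st) st) (land, [])).2

-- ===== PRECONDITION & SPEC =====
def Spec_findFarmland (land : List (List Int)) (out : List (Int × Int × Int × Int)) : Prop := out = findFarmland_alt land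
instance (land : List (List Int)) (out : List (Int × Int × Int × Int)) : Decidable (Spec_findFarmland land out) := by unfold Spec_findFarmland; infer_instance

-- ===== CLAIM (what is proved, stated in full; the proofs are below) =====
def Claim_equal_findFarmland : Prop := ∀ (land : List (List Int)), Dom_findFarmland land → Spec_findFarmland land (findFarmland land)

-- ===== LEMMAS AND PROOFS =====

-- the shape (row lengths) of the grid, invariant under everything
def pvShape (g : List (List Int)) : List Nat := g.map List.length

def pvMaxW (g : List (List Int)) : Nat := (g.map List.length).foldr max 0

theorem pvSet_getD (l : List Nat) : ∀ (i : Nat), l.set i (l.getD i 0) = l := by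
  induction l with
  | nil => intro i; simp
  | cons a t ih =>
    intro i
    cases i with
    | zero => rfl
    | succ i => simp only [List.set_cons_succ, List.getD_cons_succ, ih]

theorem pvShape_setCell (g : List (List Int)) (i j : Nat) :
    pvShape (pvSetCell g i j) = pvShape g := by
  unfold pvShape pvSetCell
  rw [List.map_set]
  have : ((g.getD i []).set j 2).length = (g.map List.length).getD i 0 := by
    simpa using (List.getD_map (l := g) (d := []) (n := i) List.length).symm
  rw [this, pvSet_getD]

theorem pvLength_of_shape (g h : List (List Int)) (e : pvShape g = pvShape h) :
    g.length = h.length := by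
  have := congrArg List.length e
  simpa [pvShape] using this

theorem pvMaxW_of_shape (g h : List (List Int)) (e : pvShape g = pvShape h) :
    pvMaxW g = pvMaxW h := by
  unfold pvMaxW
  unfold pvShape at e
  rw [e]

theorem pvRowlen_of_shape (g h : List (List Int)) (i : Nat) (e : pvShape g = pvShape h) :
    (g.getD i []).length = (h.getD i []).length := by
  have hg : (g.getD i []).length = (pvShape g).getD i 0 := by
    simpa [pvShape] using (List.getD_map (l := g) (d := []) (n := i) List.length).symm
  have hh : (h.getD i []).length = (pvShape h).getD i 0 := by
    simpa [pvShape] using (List.getD_map (l := h) (d := []) (n := i) List.length).symm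
  rw [hg, hh, e]

theorem dfsA_shape (f : Nat) : ∀ (g : List (List Int)) (y x : Int),
    pvShape (dfsA f g y x).1 = pvShape g := by
  induction f with
  | zero => intro g y x; rfl
  | succ f ih =>
    intro g y x
    simp only [dfsA]
    split
    · rw [ih, ih, pvShape_setCell]
    · rfl

theorem dfsA_nonneg (f : Nat) : ∀ (g : List (List Int)) (y x : Int),
    0 ≤ (dfsA f g y x).2.1 ∧ 0 ≤ (dfsA f g y x).2.2 := by
  induction f with
  | zero => intro g y x; exact ⟨le_refl _, le_refl _⟩
  | succ f ih =>
    intro g y x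
    simp only [dfsA]
    split
    · rename_i h
      obtain ⟨hy0, hx0, _, _, _⟩ := pvIsOne_spec g y x h
      constructor
      · exact le_trans hy0 (le_max_left _ _)
      · exact le_trans hx0 (le_max_left _ _)
    · exact ⟨le_refl _, le_refl _⟩

theorem rowlen_le_maxW (g : List (List Int)) : ∀ (i : Nat), i < g.length →
    (g.getD i []).length ≤ pvMaxW g := by
  induction g with
  | nil => intro i h; simp at h
  | cons row t ih =>
    intro i hi
    cases i with
    | zero => simp [pvMaxW]
    | succ i =>
      have := ih i (by simpa using hi)
      simp only [List.getD_cons_succ]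
      calc (t.getD i []).length ≤ pvMaxW t := this
        _ ≤ pvMaxW (row :: t) := by
            simp only [pvMaxW, List.map_cons, List.foldr_cons]
            omega

theorem pvIsOne_false_of_big (g : List (List Int)) (y x : Int)
    (h : g.length + pvMaxW g ≤ y.toNat + x.toNat) : pvIsOne g y x = false := by
  by_contra hc
  have ht : pvIsOne g y x = true := by
    cases hb : pvIsOne g y x
    · exact absurd hb hc
    · rfl
  obtain ⟨hy0, hx0, hyl, hxl, _⟩ := pvIsOne_spec g y x ht
  have := rowlen_le_maxW g y.toNat hyl
  omega

theorem max_if_lt (r y : Int) : (if r < y then y else r) = max r y := by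
  split <;> omega

theorem floodB_dfsA : ∀ (f : Nat) (g : List (List Int)) (y x : Int) (rest : List (Int × Int))
    (r c : Int), 0 ≤ r → 0 ≤ c →
    g.length + pvMaxW g ≤ f + y.toNat + x.toNat →
    floodB g ((y, x) :: rest) r c =
      floodB (dfsA f g y x).1 rest (max r (dfsA f g y x).2.1) (max c (dfsA f g y x).2.2) := by
  intro f
  induction f with
  | zero =>
    intro g y x rest r c hr hc hf
    have hfalse := pvIsOne_false_of_big g y x (by omega)
    rw [floodB]
    simp only [hfalse, Bool.false_eq_true, dite_false, dfsA]
    rw [max_eq_left hr, max_eq_left hc]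
  | succ f ih =>
    intro g y x rest r c hr hc hf
    by_cases hP : pvIsOne g y x = true
    · obtain ⟨hy0, hx0, hyl, hxl, hv⟩ := pvIsOne_spec g y x hP
      rw [floodB]
      simp only [hP, dite_true, max_if_lt]
      have hs1 : pvShape (pvSetCell g y.toNat x.toNat) = pvShape g := pvShape_setCell _ _ _
      have hl1 : (pvSetCell g y.toNat x.toNat).length = g.length := pvLength_of_shape _ _ hs1
      have hw1 : pvMaxW (pvSetCell g y.toNat x.toNat) = pvMaxW g := pvMaxW_of_shape _ _ hs1
      rw [ih (pvSetCell g y.toNat x.toNat) (y + 1) x ((y, x + 1) :: rest) (max r y) (max c x)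
        (le_trans hr (le_max_left _ _)) (le_trans hc (le_max_left _ _)) (by omega)]
      set g1 := pvSetCell g y.toNat x.toNat with hg1
      set p1 := dfsA f g1 (y + 1) x with hp1
      have hs2 : pvShape p1.1 = pvShape g := by rw [hp1, dfsA_shape]; exact hs1
      have hl2 : p1.1.length = g.length := pvLength_of_shape _ _ hs2
      have hw2 : pvMaxW p1.1 = pvMaxW g := pvMaxW_of_shape _ _ hs2
      obtain ⟨hR1, hC1⟩ := dfsA_nonneg f g1 (y + 1) x
      rw [ih p1.1 y (x + 1) rest (max (max r y) p1.2.1) (max (max c x) p1.2.2)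
        (le_trans hr (le_trans (le_max_left _ _) (le_max_left _ _)))
        (le_trans hc (le_trans (le_max_left _ _) (le_max_left _ _))) (by omega)]
      conv_rhs => rw [dfsA]
      simp only [hP, if_true, ← hg1, ← hp1]
      simp only [max_assoc]
    · have hF : pvIsOne g y x = false := by simpa using hP
      rw [floodB]
      conv_rhs => rw [dfsA]
      simp only [hF, Bool.false_eq_true, dite_false, if_false]
      rw [max_eq_left hr, max_eq_left hc]

theorem dfsA_ge (f : Nat) (g : List (List Int)) (y x : Int) (h : pvIsOne g y x = true) :
    y ≤ (dfsA (f + 1) g y x).2.1 ∧ x ≤ (dfsA (f + 1) g y x).2.2 := by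
  simp only [dfsA, h, if_true]
  exact ⟨le_max_left _ _, le_max_left _ _⟩

theorem pvMaxW_le_sum (g : List (List Int)) : pvMaxW g ≤ (g.map List.length).sum := by
  unfold pvMaxW
  induction g with
  | nil => simp
  | cons row t ih => simp only [List.map_cons, List.foldr_cons, List.sum_cons]; omega

-- the fuel the A port passes to every dfs call
def pvFuel (land : List (List Int)) : Nat := land.length + (land.map List.length).sum + 2

-- the per-cell loop bodies of the two ports, named for the fold lemmas
def pvStepA (fu : Nat) (i : Nat) (st : List (List Int) × List (Int × Int × Int × Int)) (j : Nat) :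
    List (List Int) × List (Int × Int × Int × Int) :=
  if (st.1.getD i []).getD j 0 == 1 then
    let p := dfsA fu st.1 (i : Int) (j : Int)
    (p.1, st.2 ++ [((i : Int), (j : Int), p.2.1, p.2.2)])
  else st

def pvStepB (i : Nat) (st : List (List Int) × List (Int × Int × Int × Int)) (j : Nat) :
    List (List Int) × List (Int × Int × Int × Int) :=
  if (st.1.getD i []).getD j 0 == 1 then
    let p := floodB st.1 [((i : Int), (j : Int))] (i : Int) (j : Int)
    (p.1, st.2 ++ [((i : Int), (j : Int), p.2.1, p.2.2)])
  else st

theorem pvStep_eq (land : List (List Int)) (i j : Nat)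
    (st : List (List Int) × List (Int × Int × Int × Int))
    (hs : pvShape st.1 = pvShape land) (hi : i < land.length)
    (hj : j < (st.1.getD i []).length) :
    pvStepB i st j = pvStepA (pvFuel land) i st j ∧
      pvShape (pvStepA (pvFuel land) i st j).1 = pvShape land := by
  unfold pvStepA pvStepB
  by_cases hv : (st.1.getD i []).getD j 0 == 1
  · simp only [hv, if_true]
    have hone : pvIsOne st.1 (i : Int) (j : Int) = true := by
      have h1 : (i : Int) < (st.1.length : Int) := by
        have := pvLength_of_shape st.1 land hs; omega
      have h2 : (j : Int) < (((st.1.getD i []).length : Nat) : Int) := by omega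
      simp only [pvIsOne, Int.toNat_natCast, Bool.and_eq_true, decide_eq_true_eq]
      exact ⟨⟨⟨⟨Int.natCast_nonneg i, h1⟩, Int.natCast_nonneg j⟩, h2⟩, hv⟩
    have hbound : st.1.length + pvMaxW st.1 ≤ pvFuel land + (i : Int).toNat + (j : Int).toNat := by
      have hl := pvLength_of_shape st.1 land hs
      have hw := pvMaxW_of_shape st.1 land hs
      have hws := pvMaxW_le_sum land
      simp only [Int.toNat_natCast, pvFuel]
      omega
    have hfl := floodB_dfsA (pvFuel land) st.1 (i : Int) (j : Int) [] (i : Int) (j : Int)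
      (by omega) (by omega) hbound
    have hfuel : pvFuel land = (land.length + (land.map List.length).sum + 1) + 1 := by
      simp [pvFuel]
    have hge := dfsA_ge (land.length + (land.map List.length).sum + 1) st.1 (i : Int) (j : Int) hone
    rw [← hfuel] at hge
    constructor
    · simp only [hfl, floodB, max_eq_right hge.1, max_eq_right hge.2]
    · rw [dfsA_shape]; exact hs
  · simp only [hv]
    exact ⟨rfl, hs⟩

theorem pvInner_eq (land : List (List Int)) (i : Nat) (hi : i < land.length) :
    ∀ (js : List Nat) (st : List (List Int) × List (Int × Int × Int × Int)),
      pvShape st.1 = pvShape land → (∀ j ∈ js, j < (st.1.getD i []).length) →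
      js.foldl (pvStepB i) st = js.foldl (pvStepA (pvFuel land) i) st ∧
        pvShape (js.foldl (pvStepA (pvFuel land) i) st).1 = pvShape land := by
  intro js
  induction js with
  | nil => intro st hs _; exact ⟨rfl, hs⟩
  | cons j t ih =>
    intro st hs hjs
    have hj := hjs j (by simp)
    obtain ⟨hb, hsh⟩ := pvStep_eq land i j st hs hi hj
    simp only [List.foldl_cons, hb]
    refine ih (pvStepA (pvFuel land) i st j) hsh ?_
    intro j' hj'
    have := hjs j' (by simp [hj'])
    have hrow : ((pvStepA (pvFuel land) i st j).1.getD i []).length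
        = (st.1.getD i []).length := by
      have e : pvShape (pvStepA (pvFuel land) i st j).1 = pvShape st.1 := by rw [hsh, hs]
      exact pvRowlen_of_shape _ _ i e
    omega

theorem pvOuter_eq (land : List (List Int)) :
    ∀ (is : List Nat) (st : List (List Int) × List (Int × Int × Int × Int)),
      pvShape st.1 = pvShape land → (∀ i ∈ is, i < land.length) →
      is.foldl (fun st i => (List.range ((st.1.getD i []).length)).foldl (pvStepB i) st) st
        = is.foldl (fun st i =>
            (List.range ((st.1.getD i []).length)).foldl (pvStepA (pvFuel land) i) st) st ∧
      pvShape (is.foldl (fun st i =>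
            (List.range ((st.1.getD i []).length)).foldl (pvStepA (pvFuel land) i) st) st).1
        = pvShape land := by
  intro is
  induction is with
  | nil => intro st hs _; exact ⟨rfl, hs⟩
  | cons i t ih =>
    intro st hs his
    have hi := his i (by simp)
    obtain ⟨hb, hsh⟩ := pvInner_eq land i hi (List.range ((st.1.getD i []).length)) st hs
      (fun j hj => List.mem_range.mp hj)
    simp only [List.foldl_cons, hb]
    exact ih _ hsh (fun i' hi' => his i' (by simp [hi']))

-- ===== VERDICT (by name: the statement is the Claim_ definition above) =====
theorem findFarmland_spec : Claim_equal_findFarmland := by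
  intro land _
  unfold Spec_findFarmland
  have h := pvOuter_eq land (List.range land.length) (land, []) rfl
    (fun i hi => List.mem_range.mp hi)
  have hA : findFarmland land = ((List.range land.length).foldl (fun st i =>
      (List.range ((st.1.getD i []).length)).foldl (pvStepA (pvFuel land) i) st)
      (land, [])).2 := rfl
  have hB : findFarmland_alt land = ((List.range land.length).foldl (fun st i =>
      (List.range ((st.1.getD i []).length)).foldl (pvStepB i) st) (land, [])).2 := rfl
  rw [hA, hB]
  exact (congrArg Prod.snd h.1).symm
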